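-- pv_equiv track=rewrite | github.com/bejeri4/Algo | HotelBookingsPossible.py | hotel
-- ===== SOURCE A (Python) =====
-- def hotel(arrive, depart, K):
--     arrive.sort()
--     depart.sort()
--     guests = 0
--     oldestNotYetLeftIndex = 0
--     for curDay in arrive:
--         guests += 1
--         while oldestNotYetLeftIndex < len(depart) and depart[oldestNotYetLeftIndex] <= curDay:
--             guests -= 1
--             oldestNotYetLeftIndex += 1
--         if guests > K:
--             return 0
--     return 1
-- ===== SOURCE B (Python) =====
-- def hotel(arrive, depart, K):
--     arrive.sort()
--     depart.sort()
--     # The k-th (0-based) sorted arrival has more than K concurrent guests iff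
--     # fewer than k+1-K departures have happened by then, i.e. iff the (k-K)-th
--     # sorted departure does not exist or is still strictly in the future.
--     for k, a in enumerate(arrive):
--         j = k - K
--         if j >= 0 and (j >= len(depart) or depart[j] > a):
--             return 0
--     return 1
-- ===== Notes on version B (the rewrite author's own statement) =====
-- stated objective: simpler
-- what changed: Replaces A's stateful two-pointer sweep (guests counter plus an inner while advancing a departure pointer) by a stateless per-arrival criterion: after sorting, the k-th arrival overbooks iff the (k-K)-th departure is missing or strictly later, so each arrival is checked in O(1) with no inner loop and no running guest count.
import Mathlib
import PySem

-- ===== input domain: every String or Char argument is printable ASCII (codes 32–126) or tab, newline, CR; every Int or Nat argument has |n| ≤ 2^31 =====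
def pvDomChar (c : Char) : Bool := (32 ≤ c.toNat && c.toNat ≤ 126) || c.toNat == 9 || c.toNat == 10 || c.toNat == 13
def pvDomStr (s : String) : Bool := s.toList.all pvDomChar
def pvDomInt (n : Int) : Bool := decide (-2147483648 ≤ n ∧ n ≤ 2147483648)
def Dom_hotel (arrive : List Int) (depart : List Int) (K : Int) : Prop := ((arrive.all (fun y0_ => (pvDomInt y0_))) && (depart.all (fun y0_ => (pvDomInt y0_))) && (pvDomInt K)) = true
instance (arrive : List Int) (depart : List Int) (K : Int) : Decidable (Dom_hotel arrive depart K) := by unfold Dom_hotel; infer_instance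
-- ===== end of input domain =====

-- B replaces A's two-pointer sweep with a stateless per-arrival criterion (the (k-K)-th
-- departure decides); RETURN-value equivalence is proved — both Pythons also sort the two
-- argument lists in place, the same observable mutation.

-- ===== PORT A =====
-- the inner 'while oldestNotYetLeftIndex < len(depart) and depart[oldestNotYetLeftIndex] <= curDay'
-- (depart[idx] ported as getD idx 0 — exact: the guard ensures idx is in range)
def hotelAdvance (dep : List Int) (curDay : Int) (guests : Int) (idx : Nat) : Int × Nat :=
  if idx < dep.length ∧ dep.getD idx 0 ≤ curDay then
    hotelAdvance dep curDay (guests - 1) (idx + 1)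
  else (guests, idx)
termination_by dep.length - idx
decreasing_by omega

-- the 'for curDay in arrive' loop with its early 'return 0'
def hotelLoop (dep : List Int) (K : Int) : List Int → Int → Nat → Int
  | [], _, _ => 1
  | curDay :: rest, guests, idx =>
    let s := hotelAdvance dep curDay (guests + 1) idx
    if s.1 > K then 0 else hotelLoop dep K rest s.1 s.2

def hotel (arrive : List Int) (depart : List Int) (K : Int) : Int :=
  hotelLoop (PySem.List.sorted depart (fun x => x) false) K
    (PySem.List.sorted arrive (fun x => x) false) 0 0

-- ===== PORT B =====
-- 'for k, a in enumerate(arrive): j = k - K; if j >= 0 and (j >= len(depart) or depart[j] > a): return 0'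
-- (depart[j] ported as getD j.toNat 0 — exact: the guard ensures 0 ≤ j < len(depart))
def hotelAltLoop (dep : List Int) (K : Int) : List Int → Nat → Int
  | [], _ => 1
  | a :: rest, k =>
    let j : Int := (k : Int) - K
    if 0 ≤ j ∧ ((dep.length : Int) ≤ j ∨ a < dep.getD j.toNat 0) then 0
    else hotelAltLoop dep K rest (k + 1)

def hotel_alt (arrive : List Int) (depart : List Int) (K : Int) : Int :=
  hotelAltLoop (PySem.List.sorted depart (fun x => x) false) K
    (PySem.List.sorted arrive (fun x => x) false) 0

-- ===== PRECONDITION & SPEC =====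
def Spec_hotel (arrive : List Int) (depart : List Int) (K : Int) (out : Int) : Prop := out = hotel_alt arrive depart K
instance (arrive : List Int) (depart : List Int) (K : Int) (out : Int) : Decidable (Spec_hotel arrive depart K out) := by unfold Spec_hotel; infer_instance

-- ===== CLAIM (what is proved, stated in full; the proofs are below) =====
def Claim_equal_hotel : Prop := ∀ (arrive : List Int) (depart : List Int) (K : Int), Dom_hotel arrive depart K → Spec_hotel arrive depart K (hotel arrive depart K)

-- ===== LEMMAS AND PROOFS =====

-- A's inner while loop consumes exactly the (≤ curDay)-prefix of the not-yet-consumed departures.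
lemma hotelAdvance_spec (dep : List Int) (a : Int) : ∀ (idx : Nat) (g : Int),
    hotelAdvance dep a g idx =
      (g - ((dep.drop idx).takeWhile (fun x => decide (x ≤ a))).length,
       idx + ((dep.drop idx).takeWhile (fun x => decide (x ≤ a))).length) := by
  intro idx
  induction' h : dep.length - idx using Nat.strong_induction_on with n IH generalizing idx
  intro g
  rw [hotelAdvance]
  by_cases hc : idx < dep.length ∧ dep.getD idx 0 ≤ a
  · obtain ⟨h1, h2⟩ := hc
    rw [if_pos ⟨h1, h2⟩]
    rw [IH (dep.length - (idx+1)) (by omega) (idx+1) rfl]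
    rw [List.drop_eq_getElem_cons h1]
    rw [List.takeWhile_cons]
    simp only [List.getD_eq_getElem dep 0 h1] at h2
    simp [h2]
    omega
  · rw [if_neg hc]
    rcases Nat.lt_or_ge idx dep.length with hl | hl
    · have h2 : a < dep.getD idx 0 := by
        by_contra hx; exact hc ⟨hl, by omega⟩
      rw [List.drop_eq_getElem_cons hl, List.takeWhile_cons]
      simp only [List.getD_eq_getElem dep 0 hl] at h2
      simp [not_le.mpr h2]
    · simp [List.drop_eq_nil_of_le hl]

-- Elements strictly before the takeWhile-length boundary satisfy the predicate.
lemma takeWhile_boundary (dep : List Int) (a : Int) (j : Nat)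
    (hj : j < ((dep.takeWhile (fun x => decide (x ≤ a))).length)) (hl : j < dep.length) :
    dep[j] ≤ a := by
  have h1 := (List.takeWhile_prefix (l := dep) (fun x => decide (x ≤ a))).getElem hj
  have h2 := List.mem_takeWhile_imp (List.getElem_mem hj)
  rw [h1] at h2
  simpa using h2

-- The element at the takeWhile-length boundary fails the predicate.
lemma takeWhile_boundary_fail (dep : List Int) (a : Int)
    (hl : (dep.takeWhile (fun x => decide (x ≤ a))).length < dep.length) :
    a < dep[(dep.takeWhile (fun x => decide (x ≤ a))).length] := by
  set p : Int → Bool := fun x => decide (x ≤ a) with hp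
  have hd : dep.dropWhile p ≠ [] := by
    intro h
    have h2 := List.takeWhile_append_dropWhile (p := p) (l := dep)
    rw [h, List.append_nil] at h2
    rw [h2] at hl; omega
  have hh := List.head_dropWhile_not p hd
  have h2 := List.takeWhile_append_dropWhile (p := p) (l := dep)
  have hg : dep[(dep.takeWhile p).length]'hl = (dep.dropWhile p).head hd := by
    have h3 := List.getElem_of_eq h2.symm (i := (dep.takeWhile p).length) hl
    rw [h3, List.getElem_append_right (le_refl _)]
    simp [List.getElem_zero_eq_head]
  rw [hg]
  simpa [hp] using hh

-- Splitting the takeWhile length at a pointer whose consumed prefix already satisfies ≤ a.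
lemma takeWhile_split (dep : List Int) (a : Int) (idx : Nat) (hidx : idx ≤ dep.length)
    (hpre : ∀ j, j < idx → dep.getD j 0 ≤ a) :
    (dep.takeWhile (fun x => decide (x ≤ a))).length
      = idx + ((dep.drop idx).takeWhile (fun x => decide (x ≤ a))).length := by
  set p : Int → Bool := fun x => decide (x ≤ a) with hp
  have hlen : (dep.take idx).length = idx := by simp [Nat.min_eq_left hidx]
  have hall : (dep.take idx).takeWhile p = dep.take idx := by
    rw [List.takeWhile_eq_self_iff]
    intro x hx
    obtain ⟨j, hj, rfl⟩ := List.mem_iff_getElem.mp hx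
    have hj' : j < idx := by omega
    have h3 := hpre j hj'
    rw [List.getElem_take]
    rw [List.getD_eq_getElem dep 0 (by omega)] at h3
    simpa [hp] using h3
  conv_lhs => rw [← List.take_append_drop idx dep]
  rw [List.takeWhile_append]
  rw [hall, hlen, if_pos rfl]
  simp [hlen]

-- Main loop correspondence: A's (guests, pointer) state vs B's bare arrival counter.
lemma loop_eq (dep : List Int) (K : Int) :
    ∀ (arr : List Int) (k idx : Nat),
    dep.Pairwise (· ≤ ·) → arr.Pairwise (· ≤ ·) → idx ≤ dep.length →
    (∀ j, j < idx → ∀ a ∈ arr, dep.getD j 0 ≤ a) →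
    hotelLoop dep K arr ((k : Int) - (idx : Int)) idx = hotelAltLoop dep K arr k := by
  intro arr
  induction arr with
  | nil => intro k idx _ _ _ _; simp [hotelLoop, hotelAltLoop]
  | cons a rest IH =>
    intro k idx hdep harr hidx hpre
    have hamem : a ∈ a :: rest := List.mem_cons_self
    have hpa : ∀ j, j < idx → dep.getD j 0 ≤ a := fun j hj => hpre j hj a hamem
    set c := (dep.takeWhile (fun x => decide (x ≤ a))).length with hc
    have hsplit := takeWhile_split dep a idx hidx hpa
    have hclen : c ≤ dep.length := by
      exact (List.takeWhile_prefix _).length_le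
    have hadv := hotelAdvance_spec dep a idx ((k : Int) - (idx : Int) + 1)
    have hcnd : ((k : Int) - (idx : Int) + 1
        - ((dep.drop idx).takeWhile (fun x => decide (x ≤ a))).length > K)
        ↔ (0 ≤ (k : Int) - K ∧ ((dep.length : Int) ≤ (k : Int) - K
            ∨ a < dep.getD ((k : Int) - K).toNat 0)) := by
      have hg : (k : Int) - (idx : Int) + 1
          - ((dep.drop idx).takeWhile (fun x => decide (x ≤ a))).length
          = (k : Int) + 1 - (c : Int) := by
        have h := hsplit; zify at h; omega
      rw [hg]
      by_cases hjl : (dep.length : Int) ≤ (k : Int) - K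
      · constructor
        · intro _
          have h0 : (0:Int) ≤ (dep.length : Int) := Int.natCast_nonneg _
          exact ⟨by omega, Or.inl hjl⟩
        · intro _
          have : (c : Int) ≤ dep.length := by exact_mod_cast hclen
          omega
      · rw [not_le] at hjl
        constructor
        · intro hK
          have h0 : (0 : Int) ≤ (k : Int) - K := by omega
          refine ⟨h0, Or.inr ?_⟩
          set m : Nat := ((k : Int) - K).toNat with hm
          have hmlt : m < dep.length := by omega
          have hcm : c ≤ m := by omega
          rw [List.getD_eq_getElem dep 0 hmlt]
          have hcl : c < dep.length := by omega
          have h1 := takeWhile_boundary_fail dep a hcl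
          have h2 : dep[c]'hcl ≤ dep[m]'hmlt := by
            rcases eq_or_lt_of_le hcm with heq | hlt
            · simp [heq]
            · exact (List.pairwise_iff_getElem.mp hdep) c m hcl hmlt hlt
          exact lt_of_lt_of_le h1 h2
        · rintro ⟨h0, hor⟩
          rcases hor with h | h
          · omega
          · set m : Nat := ((k : Int) - K).toNat with hm
            have hmlt : m < dep.length := by omega
            rw [List.getD_eq_getElem dep 0 hmlt] at h
            have hcm : c ≤ m := by
              by_contra hx
              rw [not_le] at hx
              have := takeWhile_boundary dep a m hx hmlt
              omega
            omega
    simp only [hotelLoop, hotelAltLoop, hadv]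
    by_cases hcase : (0 ≤ (k : Int) - K ∧ ((dep.length : Int) ≤ (k : Int) - K
        ∨ a < dep.getD ((k : Int) - K).toNat 0))
    · rw [if_pos (hcnd.mpr hcase), if_pos hcase]
    · rw [if_neg (fun hx => hcase (hcnd.mp hx)), if_neg hcase]
      have hg2 : (k : Int) - (idx : Int) + 1
          - ((dep.drop idx).takeWhile (fun x => decide (x ≤ a))).length
          = ((k + 1 : Nat) : Int) - (c : Int) := by
        have h := hsplit; zify at h; push_cast; omega
      rw [hg2, hsplit.symm]
      apply IH (k + 1) c hdep (List.Pairwise.of_cons harr) hclen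
      intro j hj a' ha'
      rw [List.getD_eq_getElem dep 0 (by omega)]
      have h1 := takeWhile_boundary dep a j hj (by omega)
      have h2 : a ≤ a' := List.rel_of_pairwise_cons harr ha'
      omega

-- ===== VERDICT (by name: the statement is the Claim_ definition above) =====
theorem hotel_spec : Claim_equal_hotel := by
  intro arrive depart K _
  unfold Spec_hotel hotel hotel_alt
  have h := loop_eq (PySem.List.sorted depart (fun x => x) false) K
    (PySem.List.sorted arrive (fun x => x) false) 0 0
    ?_ ?_ (Nat.zero_le _) (by intro j hj; omega)
  · simpa using h
  · simpa using PySem.List.sorted_pairwise depart (fun x => x)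
  · simpa using PySem.List.sorted_pairwise arrive (fun x => x)
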